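-- pv_equiv track=rewrite | github.com/Kaliyuga542/akwebdl | main.py | extract_url_and_headers
-- ===== SOURCE A (Python) =====
-- def extract_url_and_headers(text: str):
--     """
--     Parse a message that may contain a URL on first line and an optional HEADERS: block.
--     Returns (url, headers_str_or_None)
--     """
--     if not text:
--         return None, None
--     parts = text.splitlines()
--     url = None
--     headers_lines = []
--     in_headers = False
--     for raw in parts:
--         line = raw.strip()
--         if not line:
--             continue
--         upper = line.upper()
--         if upper.startswith("HEADERS:"):
--             # begin headers block
--             in_headers = True
--             remainder = line[len("HEADERS:"):].strip()
--             if remainder: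
--                 headers_lines.append(remainder)
--             continue
--         if in_headers:
--             headers_lines.append(line)
--         elif url is None:
--             url = line
--         else:
--             # extra lines before headers ignored
--             pass
--
--     headers_str = None
--     if headers_lines:
--         # join with \r\n and ensure trailing \r\n (ffmpeg expects CRLF line endings)
--         headers_str = "\r\n".join(headers_lines).strip() + "\r\n"
--     return url, headers_str
-- ===== SOURCE B (Python) =====
-- def extract_url_and_headers(text: str):
--     """
--     Parse a message that may contain a URL on first line and an optional HEADERS: block.
--     Returns (url, headers_str_or_None)
--     """
--     lines = [s for s in (raw.strip() for raw in text.splitlines()) if s]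
--     marker = next((i for i, ln in enumerate(lines)
--                    if ln.upper().startswith("HEADERS:")), None)
--     if marker is None:
--         return (lines[0] if lines else None), None
--     url = lines[0] if marker > 0 else None
--     headers_lines = []
--     for ln in lines[marker:]:
--         if ln.upper().startswith("HEADERS:"):
--             rem = ln[len("HEADERS:"):].strip()
--             if rem:
--                 headers_lines.append(rem)
--         else:
--             headers_lines.append(ln)
--     if not headers_lines:
--         return url, None
--     return url, "\r\n".join(headers_lines).strip() + "\r\n"
-- ===== Notes on version B (the rewrite author's own statement) =====
-- stated objective: alternative
-- what changed: Replaces A's single stateful scan (url/headers_lines/in_headers flags) by a decomposition: filter to non-empty stripped lines, locate the first HEADERS: marker index, take the url as the head, and build the headers list from the suffix starting at the marker.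
import Mathlib
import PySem

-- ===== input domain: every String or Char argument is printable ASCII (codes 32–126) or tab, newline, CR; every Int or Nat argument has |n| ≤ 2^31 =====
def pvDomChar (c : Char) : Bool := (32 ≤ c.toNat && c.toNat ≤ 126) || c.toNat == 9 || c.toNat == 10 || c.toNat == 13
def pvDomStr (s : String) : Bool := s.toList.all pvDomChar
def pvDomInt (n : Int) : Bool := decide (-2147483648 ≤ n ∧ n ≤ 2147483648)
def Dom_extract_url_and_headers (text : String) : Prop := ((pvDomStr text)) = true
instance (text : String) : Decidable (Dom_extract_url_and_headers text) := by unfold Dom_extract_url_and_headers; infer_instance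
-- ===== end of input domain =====

-- B replaces A's three-flag state machine by a filter + first-marker index + slice decomposition (objective: alternative/simpler decomposition, same cost).

-- ===== PORT A =====
-- loop body of A's 'for raw in parts' over the state (url, headers_lines, in_headers)
def pvAStep (st : Option String × List String × Bool) (raw : String) : Option String × List String × Bool :=
  let line := PySem.Str.strip raw
  if line = "" then st
  else
    let upper := PySem.Str.upper line
    if PySem.Str.startswith upper "HEADERS:" then
      -- remainder = line[len("HEADERS:"):].strip()  (len("HEADERS:") = 8)
      let remainder := PySem.Str.strip (PySem.Str.slice line (some 8) none)
      if remainder ≠ "" then (st.1, st.2.1 ++ [remainder], true)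
      else (st.1, st.2.1, true)
    else if st.2.2 then (st.1, st.2.1 ++ [line], st.2.2)
    else if st.1 = none then (some line, st.2.1, st.2.2)
    else st

def extract_url_and_headers (text : String) : Option String × Option String :=
  if text = "" then (none, none)
  else
    let parts := PySem.Str.splitlines text
    let st := parts.foldl pvAStep (none, [], false)
    let headers_str : Option String :=
      if st.2.1 ≠ [] then some (PySem.Str.strip (PySem.Str.join "\r\n" st.2.1) ++ "\r\n")
      else none
    (st.1, headers_str)

-- ===== PORT B =====
def pvIsMarker (ln : String) : Bool := PySem.Str.startswith (PySem.Str.upper ln) "HEADERS:"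

def pvBStep (acc : List String) (ln : String) : List String :=
  if pvIsMarker ln then
    let rem := PySem.Str.strip (PySem.Str.slice ln (some 8) none)
    if rem ≠ "" then acc ++ [rem] else acc
  else acc ++ [ln]

def extract_url_and_headers_alt (text : String) : Option String × Option String :=
  let lines := ((PySem.Str.splitlines text).map PySem.Str.strip).filter (fun s => s ≠ "")
  match lines.findIdx? pvIsMarker with
  | none => (lines.head?, none)
  | some marker =>
    let url := if marker > 0 then lines.head? else none
    let headers_lines := (lines.drop marker).foldl pvBStep []
    if headers_lines = [] then (url, none)
    else (url, some (PySem.Str.strip (PySem.Str.join "\r\n" headers_lines) ++ "\r\n"))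

-- ===== PRECONDITION & SPEC =====
def Spec_extract_url_and_headers (text : String) (out : Option String × Option String) : Prop := out = extract_url_and_headers_alt text
instance (text : String) (out : Option String × Option String) : Decidable (Spec_extract_url_and_headers text out) := by unfold Spec_extract_url_and_headers; infer_instance

-- ===== CLAIM (what is proved, stated in full; the proofs are below) =====
def Claim_equal_extract_url_and_headers : Prop := ∀ (text : String), Dom_extract_url_and_headers text → Spec_extract_url_and_headers text (extract_url_and_headers text)

-- ===== LEMMAS AND PROOFS =====

-- what one non-empty stripped line contributes to the headers list
def pvEmit (ln : String) : List String :=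
  if pvIsMarker ln then
    (if PySem.Str.strip (PySem.Str.slice ln (some 8) none) ≠ ""
     then [PySem.Str.strip (PySem.Str.slice ln (some 8) none)] else [])
  else [ln]

-- A's step on an already-stripped non-empty line
def pvGStep (st : Option String × List String × Bool) (line : String) : Option String × List String × Bool :=
  if pvIsMarker line then
    (st.1, st.2.1 ++ pvEmit line, true)
  else if st.2.2 then (st.1, st.2.1 ++ [line], st.2.2)
  else if st.1 = none then (some line, st.2.1, st.2.2)
  else st

theorem pvAStep_eq_filter : ∀ (raws : List String) (st : Option String × List String × Bool),
    raws.foldl pvAStep st = ((raws.map PySem.Str.strip).filter (fun s => s ≠ "")).foldl pvGStep st := by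
  intro raws
  induction raws with
  | nil => intro st; rfl
  | cons r t ih =>
    intro st
    by_cases h : PySem.Str.strip r = ""
    · have hA : pvAStep st r = st := by simp [pvAStep, h]
      rw [List.foldl_cons, hA, ih, List.map_cons, List.filter_cons_of_neg (by simp [h])]
    · have hA : pvAStep st r = pvGStep st (PySem.Str.strip r) := by
        simp [pvAStep, pvGStep, pvEmit, pvIsMarker, h]
        split_ifs <;> simp_all
      rw [List.foldl_cons, hA, ih, List.map_cons, List.filter_cons_of_pos (by simp [h]),
        List.foldl_cons]

theorem pvBStep_emit (acc : List String) (ln : String) : pvBStep acc ln = acc ++ pvEmit ln := by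
  simp [pvBStep, pvEmit]
  split_ifs <;> simp

theorem pvBfold_eq_flatMap : ∀ (ls : List String) (acc : List String),
    ls.foldl pvBStep acc = acc ++ ls.flatMap pvEmit := by
  intro ls
  induction ls with
  | nil => intro acc; simp
  | cons l t ih =>
    intro acc
    simp only [List.foldl_cons, List.flatMap_cons, pvBStep_emit]
    rw [ih]
    simp

theorem pvG_after : ∀ (ls : List String) (url : Option String) (hl : List String),
    ls.foldl pvGStep (url, hl, true) = (url, hl ++ ls.flatMap pvEmit, true) := by
  intro ls
  induction ls with
  | nil => intro url hl; simp
  | cons l t ih =>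
    intro url hl
    simp only [List.foldl_cons, List.flatMap_cons]
    have h : pvGStep (url, hl, true) l = (url, hl ++ pvEmit l, true) := by
      by_cases hm : pvIsMarker l = true
      · simp [pvGStep, pvEmit, hm]
      · simp [pvGStep, pvEmit, hm]
    rw [h, ih]
    simp

theorem pvG_mid : ∀ (ls : List String) (u : String),
    ls.foldl pvGStep (some u, [], false) =
      match ls.findIdx? pvIsMarker with
      | none => (some u, [], false)
      | some m => (some u, (ls.drop m).flatMap pvEmit, true) := by
  intro ls
  induction ls with
  | nil => intro u; rfl
  | cons l t ih =>
    intro u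
    simp only [List.foldl_cons, List.findIdx?_cons]
    by_cases h : pvIsMarker l = true
    · have hG : pvGStep (some u, [], false) l = (some u, pvEmit l, true) := by
        simp [pvGStep, h]
      rw [hG, pvG_after]
      simp [h]
    · have hG : pvGStep (some u, [], false) l = (some u, [], false) := by
        simp [pvGStep, h]
      rw [hG, ih]
      simp only [Bool.not_eq_true] at h
      simp only [h]
      cases hfi : t.findIdx? pvIsMarker with
      | none => simp [hfi]
      | some m => simp

theorem pvG_main : ∀ (ls : List String),
    ls.foldl pvGStep (none, [], false) =
      match ls.findIdx? pvIsMarker with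
      | none => (ls.head?, [], false)
      | some m => ((if m > 0 then ls.head? else none), (ls.drop m).flatMap pvEmit, true) := by
  intro ls
  cases ls with
  | nil => rfl
  | cons l t =>
    simp only [List.foldl_cons, List.findIdx?_cons]
    by_cases h : pvIsMarker l = true
    · have hG : pvGStep (none, [], false) l = (none, pvEmit l, true) := by
        simp [pvGStep, h]
      rw [hG, pvG_after]
      simp [h]
    · have hG : pvGStep (none, [], false) l = (some l, [], false) := by
        simp [pvGStep, h]
      rw [hG, pvG_mid]
      simp only [Bool.not_eq_true] at h
      simp only [h]
      cases hfi : t.findIdx? pvIsMarker with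
      | none => simp [hfi]
      | some m => simp

-- ===== VERDICT (by name: the statement is the Claim_ definition above) =====
theorem extract_url_and_headers_spec : Claim_equal_extract_url_and_headers := by
  intro text _
  unfold Spec_extract_url_and_headers extract_url_and_headers extract_url_and_headers_alt
  by_cases ht : text = ""
  · subst ht; rfl
  · simp only [ht, if_false]
    rw [pvAStep_eq_filter, pvG_main]
    cases hfi : (((PySem.Str.splitlines text).map PySem.Str.strip).filter (fun s => s ≠ "")).findIdx? pvIsMarker with
    | none => simp [hfi]
    | some m =>
      simp only [hfi]
      rw [pvBfold_eq_flatMap, List.nil_append]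
      by_cases hE : (((((PySem.Str.splitlines text).map PySem.Str.strip).filter (fun s => s ≠ "")).drop m).flatMap pvEmit) = []
      · rw [if_neg (not_not_intro hE), if_pos hE]
      · rw [if_pos hE, if_neg hE]
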